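-- pv_equiv track=rewrite | github.com/emu-code/LiveChatter | app.py | _build_display
-- ===== SOURCE A (Python) =====
-- def _build_display(lines):
--     """Join lines into paragraphs — a '\n' sentinel starts a new paragraph."""
--     paragraphs, current = [], []
--     for line in lines:
--         if line == "\n":
--             if current:
--                 paragraphs.append(" ".join(current))
--             current = []
--         else:
--             current.append(line)
--     if current:
--         paragraphs.append(" ".join(current))
--     return "<br><br>".join(paragraphs)
-- ===== SOURCE B (Python) =====
-- def _build_display(lines):
--     """Two-pointer run scanner: find each maximal run of non-sentinel lines
--     by index, slice and join it; no current/flush accumulator."""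
--     paras = []
--     i, n = 0, len(lines)
--     while i < n:
--         if lines[i] == "\n":
--             i += 1
--             continue
--         j = i
--         while j < n and lines[j] != "\n":
--             j += 1
--         paras.append(" ".join(lines[i:j]))
--         i = j
--     return "<br><br>".join(paras)
-- ===== Notes on version B (the rewrite author's own statement) =====
-- stated objective: alternative
-- what changed: Replaces A's element-by-element accumulator with conditional flushes by an index-based two-pointer scan that locates each maximal run of non-sentinel lines and slices-and-joins it in one step.
import Mathlib
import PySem

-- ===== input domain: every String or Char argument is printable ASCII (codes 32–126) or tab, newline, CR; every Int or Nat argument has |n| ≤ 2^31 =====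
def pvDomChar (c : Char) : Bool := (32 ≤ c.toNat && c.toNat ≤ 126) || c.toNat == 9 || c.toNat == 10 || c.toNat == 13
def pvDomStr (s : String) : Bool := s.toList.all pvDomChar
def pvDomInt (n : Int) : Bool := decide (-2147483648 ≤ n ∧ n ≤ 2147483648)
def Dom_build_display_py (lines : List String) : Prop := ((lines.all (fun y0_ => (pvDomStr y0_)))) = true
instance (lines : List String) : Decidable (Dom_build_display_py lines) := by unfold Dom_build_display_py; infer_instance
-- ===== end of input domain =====

-- B replaces A's element-by-element accumulator with conditional flushes by an index-based
-- two-pointer scan that slices-and-joins each maximal run of non-sentinel lines; same cost.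


-- ===== PORT A =====
-- loop body of A: on the sentinel, flush `current` (if non-empty) into `paragraphs`; else append
def pvStepA (st : List String × List String) (line : String) : List String × List String :=
  if line = "\n" then
    (if st.2 ≠ [] then st.1 ++ [PySem.Str.join " " st.2] else st.1, ([] : List String))
  else (st.1, st.2 ++ [line])

def build_display_py (lines : List String) : String :=
  let st := lines.foldl pvStepA ([], [])
  PySem.Str.join "<br><br>" (if st.2 ≠ [] then st.1 ++ [PySem.Str.join " " st.2] else st.1)

-- ===== PORT B =====
-- inner while loop of B: advance j past the maximal run of non-sentinel lines
def pvRunEnd (lines : List String) (n j : Nat) : Nat :=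
  if _h : j < n ∧ lines.getD j "" ≠ "\n" then pvRunEnd lines n (j + 1) else j
termination_by n - j
decreasing_by omega

-- lemma the port needs for termination: the inner loop strictly advances
lemma pvRunEnd_ge (lines : List String) (n j : Nat) : j ≤ pvRunEnd lines n j := by
  rw [pvRunEnd]
  split
  · have := pvRunEnd_ge lines n (j + 1); omega
  · exact Nat.le_refl j
termination_by n - j
decreasing_by omega

lemma pvRunEnd_gt (lines : List String) (n i : Nat) (h : i < n)
    (hs : lines.getD i "" ≠ "\n") : i < pvRunEnd lines n i := by
  rw [pvRunEnd, dif_pos ⟨h, hs⟩]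
  have := pvRunEnd_ge lines n (i + 1); omega

-- outer while loop of B: skip sentinels, slice-and-join each run (lines[i:j] = (drop i).take (j-i))
def pvScan (lines : List String) (n i : Nat) : List String :=
  if h : i < n then
    if hs : lines.getD i "" = "\n" then pvScan lines n (i + 1)
    else
      let j := pvRunEnd lines n i
      PySem.Str.join " " ((lines.drop i).take (j - i)) :: pvScan lines n j
  else []
termination_by n - i
decreasing_by
  · omega
  · have := pvRunEnd_gt lines n i h hs; omega

def build_display_py_alt (lines : List String) : String :=
  PySem.Str.join "<br><br>" (pvScan lines lines.length 0)

-- ===== PRECONDITION & SPEC =====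
def Spec_build_display_py (lines : List String) (out : String) : Prop := out = build_display_py_alt lines
instance (lines : List String) (out : String) : Decidable (Spec_build_display_py lines out) := by unfold Spec_build_display_py; infer_instance

-- ===== CLAIM (what is proved, stated in full; the proofs are below) =====
def Claim_equal_build_display_py : Prop := ∀ (lines : List String), Dom_build_display_py lines → Spec_build_display_py lines (build_display_py lines)

-- ===== LEMMAS AND PROOFS =====

-- the sentinel test as a Bool predicate (for takeWhile/dropWhile reasoning)
def pvP (s : String) : Bool := s != "\n"

lemma pvP_iff (s : String) : pvP s = true ↔ s ≠ "\n" := by simp [pvP]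

-- A's fold, expressed as a recursion over the remaining lines with pending buffer `cur`
def pvARun : List String → List String → List String
  | cur, [] => if cur ≠ [] then [PySem.Str.join " " cur] else []
  | cur, l :: ls =>
    if l = "\n" then (if cur ≠ [] then [PySem.Str.join " " cur] else []) ++ pvARun [] ls
    else pvARun (cur ++ [l]) ls

lemma pvFoldA_eq (ls : List String) : ∀ (ps cur : List String),
    (let st := ls.foldl pvStepA (ps, cur)
     if st.2 ≠ [] then st.1 ++ [PySem.Str.join " " st.2] else st.1) = ps ++ pvARun cur ls := by
  induction ls with
  | nil => intro ps cur; by_cases h : cur = [] <;> simp [pvARun, h]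
  | cons l ls ih =>
    intro ps cur
    by_cases h : l = "\n"
    · by_cases hc : cur = [] <;>
        simp [pvStepA, pvARun, h, hc, ih, List.append_assoc]
    · simp [pvStepA, pvARun, h, ih]

lemma pvARun_ne (ls : List String) : ∀ (cur : List String), cur ≠ [] →
    pvARun cur ls =
      PySem.Str.join " " (cur ++ ls.takeWhile pvP) :: pvARun [] (ls.dropWhile pvP) := by
  induction ls with
  | nil => intro cur hc; simp [pvARun, hc, List.takeWhile, List.dropWhile]
  | cons l ls ih =>
    intro cur hc
    by_cases h : l = "\n"
    · have hp : pvP l = false := by simp [pvP, h]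
      simp [pvARun, h, hc, show pvP "\n" = false from rfl]
    · have hp : pvP l = true := by simp [pvP, h]
      have hne : cur ++ [l] ≠ [] := by simp
      simp [pvARun, h, hp, ih (cur ++ [l]) hne,
        List.append_assoc]

lemma pv_take_takeWhile {α : Type} (p : α → Bool) (l : List α) :
    l.take (l.takeWhile p).length = l.takeWhile p := by
  induction l with
  | nil => rfl
  | cons a l ih =>
    by_cases h : p a <;> simp [h, List.take_succ_cons, ih]

lemma pv_drop_takeWhile {α : Type} (p : α → Bool) (l : List α) :
    l.drop (l.takeWhile p).length = l.dropWhile p := by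
  induction l with
  | nil => rfl
  | cons a l ih =>
    by_cases h : p a <;> simp [h, ih]

lemma pvRunEnd_spec (lines : List String) (n : Nat) (hn : n = lines.length) :
    ∀ (j : Nat), j ≤ n → pvRunEnd lines n j = j + ((lines.drop j).takeWhile pvP).length := by
  intro j hj
  rw [pvRunEnd]
  split
  · next h =>
    have hlt : j < lines.length := hn ▸ h.1
    have hd : lines.drop j = lines[j] :: lines.drop (j + 1) := List.drop_eq_getElem_cons hlt
    have hg : lines.getD j "" = lines[j] := List.getD_eq_getElem lines "" hlt
    have hp : pvP lines[j] = true := by rw [pvP_iff]; rw [hg] at h; exact h.2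
    have ih := pvRunEnd_spec lines n hn (j + 1) (by omega)
    rw [ih, hd, List.takeWhile_cons, hp]
    simp; omega
  · next h =>
    rcases Nat.lt_or_ge j n with hlt | hge
    · have hlt' : j < lines.length := hn ▸ hlt
      have hg : lines.getD j "" = lines[j] := List.getD_eq_getElem lines "" hlt'
      have hs : lines.getD j "" = "\n" := by
        by_contra hc; exact h ⟨hlt, hc⟩
      have hp : pvP lines[j] = false := by
        simp [pvP]; rw [← hg]; exact hs
      rw [List.drop_eq_getElem_cons hlt', List.takeWhile_cons, hp]
      simp
    · have : j = n := Nat.le_antisymm hj hge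
      subst this
      rw [List.drop_eq_nil_of_le (by omega)]
      simp
termination_by j => n - j
decreasing_by omega

lemma pvRunEnd_le (lines : List String) (n : Nat) (hn : n = lines.length)
    (j : Nat) (hj : j ≤ n) : pvRunEnd lines n j ≤ n := by
  rw [pvRunEnd_spec lines n hn j hj]
  have h1 : ((lines.drop j).takeWhile pvP).length ≤ (lines.drop j).length :=
    ((lines.drop j).takeWhile_prefix pvP).length_le
  have h2 : (lines.drop j).length = lines.length - j := List.length_drop ..
  omega

lemma pvScan_eq (lines : List String) (n : Nat) (hn : n = lines.length) :
    ∀ (i : Nat), i ≤ n → pvScan lines n i = pvARun [] (lines.drop i) := by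
  intro i hi
  rw [pvScan]
  split
  · next h =>
    have hlt : i < lines.length := hn ▸ h
    have hd : lines.drop i = lines[i] :: lines.drop (i + 1) := List.drop_eq_getElem_cons hlt
    have hg : lines.getD i "" = lines[i] := List.getD_eq_getElem lines "" hlt
    split
    · next hs =>
      have ih := pvScan_eq lines n hn (i + 1) (by omega)
      have hl : lines[i] = "\n" := by rw [← hg]; exact hs
      rw [ih, hd, hl]
      simp [pvARun]
    · next hs =>
      have hl : lines[i] ≠ "\n" := by rw [← hg]; exact hs
      have hp : pvP lines[i] = true := by rw [pvP_iff]; exact hl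
      have hrun := pvRunEnd_spec lines n hn i (by omega)
      have hle := pvRunEnd_le lines n hn i (by omega)
      have ih := pvScan_eq lines n hn (pvRunEnd lines n i) hle
      show PySem.Str.join " " ((lines.drop i).take (pvRunEnd lines n i - i)) ::
          pvScan lines n (pvRunEnd lines n i) = pvARun [] (lines.drop i)
      rw [ih]
      have htw : (lines.drop i).takeWhile pvP = lines[i] :: (lines.drop (i + 1)).takeWhile pvP := by
        rw [hd, List.takeWhile_cons, hp]; simp
      have hjmi : pvRunEnd lines n i - i = ((lines.drop (i + 1)).takeWhile pvP).length + 1 := by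
        rw [hrun, htw]; simp
      have hdropj : lines.drop (pvRunEnd lines n i) = (lines.drop (i + 1)).dropWhile pvP := by
        rw [hrun, htw, List.length_cons,
          show i + (((lines.drop (i + 1)).takeWhile pvP).length + 1)
              = (i + 1) + ((lines.drop (i + 1)).takeWhile pvP).length by omega,
          ← List.drop_drop, pv_drop_takeWhile]
      have htake : (lines.drop i).take (pvRunEnd lines n i - i)
          = lines[i] :: (lines.drop (i + 1)).takeWhile pvP := by
        rw [hjmi, hd, List.take_succ_cons, pv_take_takeWhile]
      rw [htake, hdropj, hd]
      have := pvARun_ne (lines.drop (i + 1)) [lines[i]] (by simp)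
      simp [pvARun, hl, this]
  · next h =>
    rw [List.drop_eq_nil_of_le (by omega)]
    simp [pvARun]
termination_by i => n - i
decreasing_by
  all_goals first
    | omega
    | (have := pvRunEnd_gt lines n i (by assumption) (by assumption); omega)

-- ===== VERDICT (by name: the statement is the Claim_ definition above) =====
theorem build_display_py_spec : Claim_equal_build_display_py := by
  intro lines _
  show build_display_py lines = build_display_py_alt lines
  rw [build_display_py, build_display_py_alt,
    pvScan_eq lines lines.length rfl 0 (Nat.zero_le _)]
  simp [pvFoldA_eq lines [] []]
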